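-- pv_equiv track=rewrite | github.com/hassen-bouchhiwa/Burp_Extensions | SSRF-Scanner/ssrf.py | generate_ip_combinations
-- ===== SOURCE A (Python) =====
-- def generate_ip_combinations(ip_pattern):
--     parts = ip_pattern.split(".")
--
--     result = [""]
--
--     for part in parts:
--         new_result = []
--         if part == "xx":
--             new_result = [existing_ip + str(i) + "." for existing_ip in result for i in range(1, 256)]
--         elif "-" in part:
--             start, end = map(int, part.split("-"))
--             new_result = [existing_ip + str(i) + "." for existing_ip in result for i in range(start, end + 1)]
--         elif "," in part:
--             options = part.split(",")
--             new_result = [existing_ip + opt + "." for existing_ip in result for opt in options]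
--         else:
--             new_result = [existing_ip + part + "." for existing_ip in result]
--
--         result = new_result
--
--     result = [ip.rstrip(".") for ip in result]
--
--     return result
-- ===== SOURCE B (Python) =====
-- def _options(part):
--     if part == "xx":
--         return [str(i) for i in range(1, 256)]
--     if "-" in part:
--         start, end = map(int, part.split("-"))
--         return [str(i) for i in range(start, end + 1)]
--     if "," in part:
--         return part.split(",")
--     return [part]
--
--
-- def _product(option_lists):
--     if not option_lists:
--         return [()]
--     rest = _product(option_lists[1:])
--     return [(o,) + t for o in option_lists[0] for t in rest]
--
--
-- def generate_ip_combinations(ip_pattern):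
--     option_lists = [_options(p) for p in ip_pattern.split(".")]
--     return [".".join(t) for t in _product(option_lists)]
-- ===== Notes on version B (the rewrite author's own statement) =====
-- stated objective: alternative
-- what changed: A incrementally extends a list of dot-suffixed prefix strings part by part and finally rstrips the trailing dot from every result; B precomputes one option list per dot-part, takes their Cartesian product by structural recursion, and '.'-joins each tuple.
-- outside the precondition, e.g. on generate_ip_combinations('1.'): A returns ['1'], B returns ['1.']; on generate_ip_combinations('1.2,'): A returns ['1.2', '1'], B returns ['1.2', '1.']; on generate_ip_combinations('.'): A returns [''], B returns ['.']
import Mathlib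
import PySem

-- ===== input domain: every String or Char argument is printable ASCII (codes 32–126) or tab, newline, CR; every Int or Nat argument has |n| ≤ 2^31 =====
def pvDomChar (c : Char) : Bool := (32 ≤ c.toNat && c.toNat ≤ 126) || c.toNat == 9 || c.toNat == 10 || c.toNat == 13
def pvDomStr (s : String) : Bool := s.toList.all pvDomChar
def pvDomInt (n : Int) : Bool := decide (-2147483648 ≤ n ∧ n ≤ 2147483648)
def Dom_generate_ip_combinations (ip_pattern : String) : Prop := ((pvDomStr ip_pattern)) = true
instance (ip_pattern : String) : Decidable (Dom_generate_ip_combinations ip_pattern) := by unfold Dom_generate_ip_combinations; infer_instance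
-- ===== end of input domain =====

-- B replaces A's incremental dot-suffixed prefix accumulation (and final per-string rstrip('.'))
-- by per-part option lists, a recursive Cartesian product and a '.'-join (objective: alternative
-- decomposition, similar cost).


-- ===== PORT A =====
-- hand port of Python's s.rstrip("."): drop all trailing '.' characters (exact)
def pvRstripDot (s : List Char) : List Char := (s.reverse.dropWhile (· == '.')).reverse

-- the body of A's 'for part in parts' loop
def pvLoopBodyA (result : List (List Char)) (part : List Char) : List (List Char) :=
  if part == ['x', 'x'] then
    result.flatMap (fun e => (PySem.List.pyRange 1 256 1).map (fun i => e ++ PySem.Int.toChars i ++ ['.']))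
  else if PySem.Chars.isIn ['-'] part then
    match PySem.Chars.splitOn part ['-'] with
    | [s, t] =>
      match PySem.Int.ofChars? s, PySem.Int.ofChars? t with
      | some start, some stop =>
          result.flatMap (fun e => (PySem.List.pyRange start (stop + 1) 1).map (fun i => e ++ PySem.Int.toChars i ++ ['.']))
      | _, _ => []        -- Python: int() raises ValueError here (outside Pre_)
    | _ => []             -- Python: unpacking raises ValueError here (outside Pre_)
  else if PySem.Chars.isIn [','] part then
    result.flatMap (fun e => (PySem.Chars.splitOn part [',']).map (fun o => e ++ o ++ ['.']))
  else
    result.map (fun e => e ++ part ++ ['.'])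

def generate_ip_combinations (ip_pattern : String) : List String :=
  ((PySem.Chars.splitOn ip_pattern.toList ['.']).foldl pvLoopBodyA [[]]).map
    (fun ip => String.ofList (pvRstripDot ip))

-- ===== PORT B =====
-- B's helper _options(part)
def pvOptionsB (part : List Char) : List (List Char) :=
  if part == ['x', 'x'] then
    (PySem.List.pyRange 1 256 1).map PySem.Int.toChars
  else if PySem.Chars.isIn ['-'] part then
    match PySem.Chars.splitOn part ['-'] with
    | [s, t] =>
      match PySem.Int.ofChars? s, PySem.Int.ofChars? t with
      | some start, some stop => (PySem.List.pyRange start (stop + 1) 1).map PySem.Int.toChars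
      | _, _ => []        -- Python: int() raises ValueError here (outside Pre_)
    | _ => []             -- Python: unpacking raises ValueError here (outside Pre_)
  else if PySem.Chars.isIn [','] part then
    PySem.Chars.splitOn part [',']
  else
    [part]

-- B's helper _product(option_lists): structural recursion on the list of option lists
def pvProductB : List (List (List Char)) → List (List (List Char))
  | [] => [[]]
  | l :: ls => l.flatMap (fun o => (pvProductB ls).map (fun t => o :: t))

def generate_ip_combinations_alt (ip_pattern : String) : List String :=
  (pvProductB ((PySem.Chars.splitOn ip_pattern.toList ['.']).map pvOptionsB)).map
    (fun t => String.ofList (PySem.Chars.join ['.'] t))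

-- ===== PRECONDITION & SPEC =====
def pvParses (s : List Char) : Bool := (PySem.Int.ofChars? s).isSome

-- the '-'-branch of A does not raise on this part
def pvDashOK (p : List Char) : Bool :=
  p == ['x', 'x'] || !(PySem.Chars.isIn ['-'] p) ||
    (match PySem.Chars.splitOn p ['-'] with
     | [s, t] => pvParses s && pvParses t
     | _ => false)

-- this part contributes an empty option string
def pvEmptyOptLast (p : List Char) : Bool :=
  if p == ['x', 'x'] then false
  else if PySem.Chars.isIn ['-'] p then false
  else if PySem.Chars.isIn [','] p then (PySem.Chars.splitOn p [',']).contains ([] : List Char)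
  else p == []

-- this part contributes at least one option
def pvNonemptyOpts (p : List Char) : Bool :=
  if p == ['x', 'x'] then true
  else if PySem.Chars.isIn ['-'] p then
    (match PySem.Chars.splitOn p ['-'] with
     | [s, t] =>
       match PySem.Int.ofChars? s, PySem.Int.ofChars? t with
       | some start, some stop => start ≤ stop
       | _, _ => true
     | _ => true)
  else true

-- Pre_ excludes (i) inputs where some dot-part containing '-' does not split into exactly two
-- int()-parseable pieces — there Python A raises ValueError — and (ii) patterns of ≥ 2 dot-parts
-- whose LAST part contributes an empty option while every earlier part contributes options:
-- there the combination string ends in '.', A's rstrip('.') eats the empty final component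
-- ('1.' → ['1']) while B keeps it ('1.'), both defensible on such degenerate patterns.
def Pre_generate_ip_combinations (ip_pattern : String) : Prop :=
  (∀ p ∈ PySem.Chars.splitOn ip_pattern.toList ['.'], pvDashOK p = true) ∧
  ¬ (2 ≤ (PySem.Chars.splitOn ip_pattern.toList ['.']).length ∧
     pvEmptyOptLast ((PySem.Chars.splitOn ip_pattern.toList ['.']).getLastD []) = true ∧
     ∀ p ∈ (PySem.Chars.splitOn ip_pattern.toList ['.']).dropLast, pvNonemptyOpts p = true)

instance (ip_pattern : String) : Decidable (Pre_generate_ip_combinations ip_pattern) := by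
  unfold Pre_generate_ip_combinations; infer_instance

def pvWitness_generate_ip_combinations : String := "1,2.3-4.7"

def Spec_generate_ip_combinations (ip_pattern : String) (out : List String) : Prop := out = generate_ip_combinations_alt ip_pattern
instance (ip_pattern : String) (out : List String) : Decidable (Spec_generate_ip_combinations ip_pattern out) := by unfold Spec_generate_ip_combinations; infer_instance

-- ===== CLAIM (what is proved, stated in full; the proofs are below) =====
def Claim_equal_generate_ip_combinations : Prop := ∀ (ip_pattern : String), Dom_generate_ip_combinations ip_pattern → Pre_generate_ip_combinations ip_pattern → Spec_generate_ip_combinations ip_pattern (generate_ip_combinations ip_pattern)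

-- ===== LEMMAS AND PROOFS =====

-- simple recursive model of Python's s.split(c) for a one-character separator
def pvSplit1 (c : Char) : List Char → List (List Char)
  | [] => [[]]
  | x :: xs => if x == c then [] :: pvSplit1 c xs else (pvSplit1 c xs).modifyHead (x :: ·)

-- each tuple of the product, flattened with a '.' after every component (A's pre-rstrip strings)
def pvFlatDot (t : List (List Char)) : List Char := (t.map (· ++ ['.'])).flatten

theorem pvSplit1_ne_nil (c : Char) (l : List Char) : pvSplit1 c l ≠ [] := by
  induction l with
  | nil => simp [pvSplit1]
  | cons x xs ih =>
    simp only [pvSplit1]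
    split
    · simp
    · cases hh : pvSplit1 c xs with
      | nil => exact absurd hh ih
      | cons a b => simp [List.modifyHead]

theorem pvSplitOn_go_eq (c : Char) (l : List Char) :
    ∀ (fuel : Nat) (cur : List Char) (acc : List (List Char)), l.length ≤ fuel →
      PySem.Chars.splitOn.go [c] fuel l cur acc =
        acc.reverse ++ (pvSplit1 c l).modifyHead (cur.reverse ++ ·) := by
  induction l with
  | nil =>
    intro fuel cur acc _
    cases fuel <;> simp [PySem.Chars.splitOn.go, pvSplit1]
  | cons x xs ih =>
    intro fuel cur acc hf
    cases fuel with
    | zero => simp at hf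
    | succ f =>
      have hf' : xs.length ≤ f := by simpa using hf
      by_cases hx : x = c
      · subst hx
        have hpre : List.isPrefixOf [x] (x :: xs) = true := by simp [List.isPrefixOf]
        simp only [PySem.Chars.splitOn.go, hpre, if_pos]
        have hdrop : List.drop (List.length [x]) (x :: xs) = xs := by simp
        rw [hdrop, ih f [] (cur.reverse :: acc) (by simpa using hf')]
        cases hh : pvSplit1 x xs <;> simp_all [pvSplit1, List.modifyHead]
      · have hpre : List.isPrefixOf [c] (x :: xs) = false := by
          simp [List.isPrefixOf]
          intro h; exact absurd h.symm hx
        simp only [PySem.Chars.splitOn.go, hpre]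
        rw [ih f (x :: cur) acc hf']
        simp only [pvSplit1, beq_iff_eq, hx, List.reverse_cons]
        obtain ⟨h, t, he⟩ : ∃ h t, pvSplit1 c xs = h :: t := by
          cases hh : pvSplit1 c xs with
          | nil => exact absurd hh (pvSplit1_ne_nil c xs)
          | cons a b => exact ⟨a, b, rfl⟩
        simp [he, List.modifyHead]

theorem pvSplitOn_eq (c : Char) (s : List Char) :
    PySem.Chars.splitOn s [c] = pvSplit1 c s := by
  unfold PySem.Chars.splitOn
  rw [pvSplitOn_go_eq c s (s.length + 1) [] [] (by omega)]
  cases hh : pvSplit1 c s <;> simp [List.modifyHead]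

theorem pvMem_pvSplit1_subset {c : Char} {l p : List Char} (hp : p ∈ pvSplit1 c l) :
    ∀ x ∈ p, x ∈ l := by
  induction l generalizing p with
  | nil => simp [pvSplit1] at hp; simp [hp]
  | cons y ys ih =>
    simp only [pvSplit1] at hp
    split at hp
    · rcases List.mem_cons.mp hp with h | h
      · simp [h]
      · intro x hx; exact List.mem_cons_of_mem _ (ih h x hx)
    · cases hh : pvSplit1 c ys with
      | nil => simp [hh] at hp
      | cons a b =>
        rw [hh] at hp
        simp only [List.modifyHead] at hp
        rcases List.mem_cons.mp hp with h | h
        · subst h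
          intro x hx
          rcases List.mem_cons.mp hx with h | h
          · simp [h]
          · exact List.mem_cons_of_mem _ (ih (hh ▸ List.mem_cons_self) x h)
        · intro x hx
          exact List.mem_cons_of_mem _ (ih (hh ▸ List.mem_cons_of_mem _ h) x hx)

theorem pvNot_mem_pvSplit1 {c : Char} {l p : List Char} (hp : p ∈ pvSplit1 c l) : c ∉ p := by
  induction l generalizing p with
  | nil => simp [pvSplit1] at hp; simp [hp]
  | cons y ys ih =>
    simp only [pvSplit1] at hp
    split at hp
    · rcases List.mem_cons.mp hp with h | h
      · simp [h]
      · exact ih h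
    · rename_i hy
      cases hh : pvSplit1 c ys with
      | nil => simp [hh] at hp
      | cons a b =>
        rw [hh] at hp
        simp only [List.modifyHead] at hp
        rcases List.mem_cons.mp hp with h | h
        · subst h
          intro hx
          rcases List.mem_cons.mp hx with h | h
          · exact hy (by simp [h])
          · exact ih (hh ▸ List.mem_cons_self) h
        · exact ih (hh ▸ List.mem_cons_of_mem _ h)

theorem pvDigitChar_ne_dot (n : Nat) : Nat.digitChar n ≠ '.' := by
  match n with
  | 0 => decide
  | 1 => decide
  | 2 => decide
  | 3 => decide
  | 4 => decide
  | 5 => decide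
  | 6 => decide
  | 7 => decide
  | 8 => decide
  | 9 => decide
  | 10 => decide
  | 11 => decide
  | 12 => decide
  | 13 => decide
  | 14 => decide
  | 15 => decide
  | (m+16) =>
    unfold Nat.digitChar
    repeat rw [if_neg (by omega)]
    decide

theorem pvToDigitsCore_ne_dot (b fuel n : Nat) (ds : List Char) (h : ∀ c ∈ ds, c ≠ '.') :
    ∀ c ∈ Nat.toDigitsCore b fuel n ds, c ≠ '.' := by
  induction fuel generalizing n ds with
  | zero => simpa [Nat.toDigitsCore] using h
  | succ f ih =>
    simp only [Nat.toDigitsCore]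
    split
    · intro c hc
      rcases List.mem_cons.mp hc with h' | h'
      · subst h'; exact pvDigitChar_ne_dot _
      · exact h c h'
    · exact ih _ _ (by
        intro c hc
        rcases List.mem_cons.mp hc with h' | h'
        · subst h'; exact pvDigitChar_ne_dot _
        · exact h c h')

theorem pvToDigitsCore_ne_nil (b fuel n : Nat) (ds : List Char) (h : ds ≠ [] ∨ fuel ≠ 0) :
    Nat.toDigitsCore b fuel n ds ≠ [] := by
  induction fuel generalizing n ds with
  | zero =>
    simp only [Nat.toDigitsCore]
    rcases h with h | h
    · exact h
    · omega
  | succ f ih =>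
    simp only [Nat.toDigitsCore]
    split
    · simp
    · exact ih _ _ (Or.inl (by simp))

theorem pvToChars_ne_dot (i : Int) : '.' ∉ PySem.Int.toChars i := by
  unfold PySem.Int.toChars
  split
  · intro hm
    rcases List.mem_cons.mp hm with h | h
    · exact absurd h (by decide)
    · exact pvToDigitsCore_ne_dot 10 _ _ [] (by simp) _ h rfl
  · intro hm
    exact pvToDigitsCore_ne_dot 10 _ _ [] (by simp) _ hm rfl

theorem pvToChars_ne_nil (i : Int) : PySem.Int.toChars i ≠ [] := by
  unfold PySem.Int.toChars
  split
  · simp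
  · exact pvToDigitsCore_ne_nil 10 _ _ [] (Or.inr (by omega))

theorem pvOptionsB_no_dot {p o : List Char} (hp : '.' ∉ p) (ho : o ∈ pvOptionsB p) :
    '.' ∉ o := by
  unfold pvOptionsB at ho
  split at ho
  · simp only [List.mem_map] at ho
    obtain ⟨i, _, rfl⟩ := ho
    exact pvToChars_ne_dot i
  · split at ho
    · split at ho
      · split at ho
        · simp only [List.mem_map] at ho
          obtain ⟨i, _, rfl⟩ := ho
          exact pvToChars_ne_dot i
        · simp at ho
      · simp at ho
    · split at ho
      · rw [pvSplitOn_eq] at ho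
        intro hd
        exact hp (pvMem_pvSplit1_subset ho '.' hd)
      · simp only [List.mem_singleton] at ho
        subst ho; exact hp

theorem pvOptionsB_nonempty {p o : List Char} (hp : pvEmptyOptLast p = false)
    (ho : o ∈ pvOptionsB p) : o ≠ [] := by
  unfold pvOptionsB at ho
  unfold pvEmptyOptLast at hp
  split at ho
  · simp only [List.mem_map] at ho
    obtain ⟨i, _, rfl⟩ := ho
    exact pvToChars_ne_nil i
  · rename_i hxx
    rw [if_neg hxx] at hp
    split at ho
    · rename_i hdash
      rw [if_pos hdash] at hp
      split at ho
      · split at ho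
        · simp only [List.mem_map] at ho
          obtain ⟨i, _, rfl⟩ := ho
          exact pvToChars_ne_nil i
        · simp at ho
      · simp at ho
    · rename_i hdash
      rw [if_neg hdash] at hp
      split at ho
      · rename_i hcomma
        rw [if_pos hcomma] at hp
        intro he; subst he
        exact absurd ho (by simpa [List.contains_iff_mem] using hp)
      · rename_i hcomma
        rw [if_neg hcomma] at hp
        simp only [List.mem_singleton] at ho
        subst ho
        simpa using hp

theorem pvNonemptyOpts_of_mem {p o : List Char} (ho : o ∈ pvOptionsB p) :
    pvNonemptyOpts p = true := by
  unfold pvOptionsB at ho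
  unfold pvNonemptyOpts
  split at ho
  · rename_i h; rw [if_pos h]
  · rename_i hxx
    rw [if_neg hxx]
    split at ho
    · rename_i hdash
      rw [if_pos hdash]
      split at ho
      · rename_i s t heq
        split at ho
        · rename_i start stop hs ht
          simp only [List.mem_map] at ho
          obtain ⟨i, hi, rfl⟩ := ho
          have := PySem.List.mem_pyRange_one.mp hi
          simp only [decide_eq_true_eq]
          omega
        · simp at ho
      · simp at ho
    · rename_i hdash
      rw [if_neg hdash]

theorem pvMem_pvProductB {t : List (List Char)} {L : List (List (List Char))}
    (ht : t ∈ pvProductB L) : List.Forall₂ (· ∈ ·) t L := by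
  induction L generalizing t with
  | nil => simp [pvProductB] at ht; simp [ht]
  | cons l ls ih =>
    simp only [pvProductB, List.mem_flatMap, List.mem_map] at ht
    obtain ⟨o, ho, t', ht', rfl⟩ := ht
    exact List.Forall₂.cons ho (ih ht')

theorem pvLoopBodyA_eq (result : List (List Char)) (part : List Char) :
    pvLoopBodyA result part =
      result.flatMap (fun e => (pvOptionsB part).map (fun o => e ++ o ++ ['.'])) := by
  unfold pvLoopBodyA pvOptionsB
  split
  · simp [List.map_map, Function.comp_def]
  · split
    · split
      · split
        · simp [List.map_map, Function.comp_def]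
        · simp
      · simp
    · split
      · rfl
      · induction result <;> simp_all [List.flatMap]

theorem pvFoldl_eq_product (L : List (List Char)) (R : List (List Char)) :
    L.foldl pvLoopBodyA R
      = R.flatMap (fun e => (pvProductB (L.map pvOptionsB)).map (fun t => e ++ pvFlatDot t)) := by
  induction L generalizing R with
  | nil => simp [pvProductB, pvFlatDot]
  | cons p L ih =>
    rw [List.foldl_cons, ih, pvLoopBodyA_eq]
    simp only [List.map_cons, pvProductB, pvFlatDot, List.flatMap_assoc, List.map_flatMap,
      List.flatMap_map, List.map_map, Function.comp_def, List.flatten_cons, List.map_cons]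
    simp [List.append_assoc]

theorem pvJoin_ne_nil {t : List (List Char)} (ht : t ≠ [])
    (hl : t.getLast ht ≠ []) : PySem.Chars.join ['.'] t ≠ [] := by
  induction t with
  | nil => exact absurd rfl ht
  | cons o t ih =>
    cases t with
    | nil => simpa [PySem.Chars.join_singleton] using hl
    | cons o' t' =>
      rw [PySem.Chars.join_cons_cons]
      simp

theorem pvDropWhile_no_dot (l : List Char) (h : ∀ x ∈ l, x ≠ '.') :
    l.dropWhile (· == '.') = l := by
  cases l with
  | nil => rfl
  | cons x xs =>
    rw [List.dropWhile_cons_of_neg]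
    simp only [beq_iff_eq]
    exact h x (by simp)

theorem pvRstripDot_append (a b : List Char) (hb : pvRstripDot b ≠ []) :
    pvRstripDot (a ++ b) = a ++ pvRstripDot b := by
  unfold pvRstripDot at *
  rw [List.reverse_append, List.dropWhile_append]
  have : (b.reverse.dropWhile (· == '.')).isEmpty = false := by
    cases hh : b.reverse.dropWhile (· == '.') with
    | nil => simp [hh] at hb
    | cons x xs => simp
  rw [if_neg (by simp [this])]
  simp

theorem pvRstrip_flat_eq_join (t : List (List Char))
    (hnd : ∀ o ∈ t, '.' ∉ o)
    (hlast : ∀ (h : t ≠ []), 2 ≤ t.length → t.getLast h ≠ []) :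
    pvRstripDot (pvFlatDot t) = PySem.Chars.join ['.'] t := by
  induction t with
  | nil => simp [pvFlatDot, pvRstripDot, PySem.Chars.join, List.intercalate]
  | cons o t ih =>
    cases t with
    | nil =>
      rw [PySem.Chars.join_singleton]
      show pvRstripDot ((List.map (· ++ ['.']) [o]).flatten) = o
      simp only [List.map_cons, List.map_nil, List.flatten]
      unfold pvRstripDot
      have h1 : ((o ++ ['.']).append []).reverse = '.' :: o.reverse := by simp
      have h2 : List.dropWhile (fun x : Char => x == '.') ('.' :: o.reverse)
          = List.dropWhile (fun x : Char => x == '.') o.reverse := by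
        simp
      rw [h1, h2]
      rw [pvDropWhile_no_dot o.reverse (by
        intro x hx he; subst he
        exact hnd o (by simp) (by simpa using hx))]
      simp
    | cons o' t' =>
      have hne : (o' :: t') ≠ [] := by simp
      have hIH : pvRstripDot (pvFlatDot (o' :: t')) = PySem.Chars.join ['.'] (o' :: t') := by
        apply ih
        · intro x hx; exact hnd x (List.mem_cons_of_mem _ hx)
        · intro h h2
          have := hlast (by simp) (by simp)
          simpa [List.getLast_cons] using this
      have hglast : (o' :: t').getLast hne ≠ [] := by
        have := hlast (by simp) (by simp)
        simpa [List.getLast_cons] using this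
      have hjne : PySem.Chars.join ['.'] (o' :: t') ≠ [] := pvJoin_ne_nil hne hglast
      rw [PySem.Chars.join_cons_cons]
      have hflat : pvFlatDot (o :: o' :: t') = (o ++ ['.']) ++ pvFlatDot (o' :: t') := by
        simp [pvFlatDot]
      rw [hflat, pvRstripDot_append (o ++ ['.']) _ (by rw [hIH]; exact hjne), hIH]

theorem pvForall₂_mem_left {R : List Char → List (List Char) → Prop} {t : List (List Char)}
    {L : List (List (List Char))} (h : List.Forall₂ R t L) {o : List Char} (ho : o ∈ t) :
    ∃ l ∈ L, R o l := by
  induction h with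
  | nil => simp at ho
  | cons hr _ ih =>
    rcases List.mem_cons.mp ho with h' | h'
    · subst h'; exact ⟨_, by simp, hr⟩
    · obtain ⟨l, hl, hrl⟩ := ih h'
      exact ⟨l, List.mem_cons_of_mem _ hl, hrl⟩

theorem pvForall₂_mem_right {R : List Char → List (List Char) → Prop} {t : List (List Char)}
    {L : List (List (List Char))} (h : List.Forall₂ R t L) {l : List (List Char)} (hl : l ∈ L) :
    ∃ o ∈ t, R o l := by
  induction h with
  | nil => simp at hl
  | cons hr _ ih =>
    rcases List.mem_cons.mp hl with h' | h'
    · subst h'; exact ⟨_, by simp, hr⟩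
    · obtain ⟨o, ho, hrl⟩ := ih h'
      exact ⟨o, List.mem_cons_of_mem _ ho, hrl⟩

theorem pvForall₂_getLast {R : List Char → List (List Char) → Prop} {t : List (List Char)}
    {L : List (List (List Char))} (h : List.Forall₂ R t L) (ht : t ≠ []) (hL : L ≠ []) :
    R (t.getLast ht) (L.getLast hL) := by
  induction h with
  | nil => exact absurd rfl ht
  | @cons o l t' L' hr htl ih =>
    cases htl with
    | nil => simpa using hr
    | cons hr' htl' =>
      rw [List.getLast_cons (List.cons_ne_nil _ _), List.getLast_cons (List.cons_ne_nil _ _)]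
      exact ih (List.cons_ne_nil _ _) (List.cons_ne_nil _ _)

theorem pvPorts_eq (ip_pattern : String) (hpre : Pre_generate_ip_combinations ip_pattern) :
    generate_ip_combinations ip_pattern = generate_ip_combinations_alt ip_pattern := by
  obtain ⟨-, hpre2⟩ := hpre
  unfold generate_ip_combinations generate_ip_combinations_alt
  rw [pvFoldl_eq_product]
  set parts := PySem.Chars.splitOn ip_pattern.toList ['.'] with hparts
  have hpne : parts ≠ [] := by rw [hparts, pvSplitOn_eq]; exact pvSplit1_ne_nil '.' _
  simp only [List.flatMap_cons, List.flatMap_nil, List.nil_append, List.append_nil, List.map_map]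
  apply List.map_congr_left
  intro t ht
  have hf2 := pvMem_pvProductB ht
  have hLne : parts.map pvOptionsB ≠ [] := by simpa using hpne
  simp only [Function.comp_apply]
  congr 1
  apply pvRstrip_flat_eq_join
  · -- every component of the tuple is dot-free
    intro o ho
    obtain ⟨l, hl, hol⟩ := pvForall₂_mem_left hf2 ho
    obtain ⟨p, hp, rfl⟩ := List.mem_map.mp hl
    have hpdot : '.' ∉ p := by
      rw [hparts, pvSplitOn_eq] at hp
      exact pvNot_mem_pvSplit1 hp
    exact pvOptionsB_no_dot hpdot hol
  · -- under Pre_, the last component is nonempty whenever there are ≥ 2 parts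
    intro htne hlen2
    have hlenL : t.length = parts.length := by
      have := List.Forall₂.length_eq hf2
      simpa using this
    have hplen2 : 2 ≤ parts.length := by omega
    -- every earlier part has a nonempty option list (witnessed by t)
    have hnonempty : ∀ p ∈ parts.dropLast, pvNonemptyOpts p = true := by
      intro p hp
      have hp' : p ∈ parts := List.dropLast_subset _ hp
      have hl : pvOptionsB p ∈ parts.map pvOptionsB := List.mem_map_of_mem hp'
      obtain ⟨o, _, hol⟩ := pvForall₂_mem_right hf2 hl
      exact pvNonemptyOpts_of_mem hol
    have hlastfalse : pvEmptyOptLast (parts.getLastD []) = false := by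
      by_contra hx
      exact hpre2 ⟨hplen2, by simpa using (Bool.not_eq_false _).mp hx, hnonempty⟩
    have hglast := pvForall₂_getLast hf2 htne hLne
    have hmapLast : (parts.map pvOptionsB).getLast hLne = pvOptionsB (parts.getLast hpne) := by
      simp [List.getLast_map]
    rw [hmapLast] at hglast
    have : parts.getLastD [] = parts.getLast hpne := by
      rw [List.getLastD_eq_getLast?, List.getLast?_eq_some_getLast hpne]
      rfl
    rw [this] at hlastfalse
    exact pvOptionsB_nonempty hlastfalse hglast

-- ===== VERDICT (by name: the statement is the Claim_ definition above) =====
theorem generate_ip_combinations_spec : Claim_equal_generate_ip_combinations := by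
  intro ip_pattern _ hpre
  unfold Spec_generate_ip_combinations
  exact pvPorts_eq ip_pattern hpre
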